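-- pv_equiv track=rewrite | github.com/yujinhongMM/Python- | practice1-9.py | getActorPair
-- ===== SOURCE A (Python) =====
-- def getActorPair(actors):
--     result = []
--
--     for index, actor1 in enumerate(actors[:-1]):
--         for _, actor2 in enumerate(actors[index + 1:]):
--             actorPair = (actor1[0], actor2[0])
--             films = actor1[1] & actor2[1]
--             result.append((actorPair, films))
--
--     return result
-- ===== SOURCE B (Python) =====
-- def getActorPair(actors):
--     n = len(actors)
--     # inverted index: film -> list of indices of actors whose set contains it
--     pairs = [(f, i) for i, (_, films) in enumerate(actors) for f in films]
--     index_of = {}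
--     for f, i in pairs:
--         index_of.setdefault(f, []).append(i)
--     result = []
--     for i, (name_i, films_i) in enumerate(actors):
--         shared = {}
--         for f in films_i:
--             for j in index_of.get(f, []):
--                 if j > i:
--                     shared.setdefault(j, []).append(f)
--         for j in range(i + 1, n):
--             result.append(((name_i, actors[j][0]), set(shared.get(j, []))))
--     return result
-- ===== Notes on version B (the rewrite author's own statement) =====
-- stated objective: alternative
-- what changed: B replaces the per-pair set intersections with an inverted index (film -> actor indices) built in one pass; each actor's shared-film buckets are then filled by walking that index, and the pre-ordered pair list is emitted so empty intersections survive.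
import Mathlib
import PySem

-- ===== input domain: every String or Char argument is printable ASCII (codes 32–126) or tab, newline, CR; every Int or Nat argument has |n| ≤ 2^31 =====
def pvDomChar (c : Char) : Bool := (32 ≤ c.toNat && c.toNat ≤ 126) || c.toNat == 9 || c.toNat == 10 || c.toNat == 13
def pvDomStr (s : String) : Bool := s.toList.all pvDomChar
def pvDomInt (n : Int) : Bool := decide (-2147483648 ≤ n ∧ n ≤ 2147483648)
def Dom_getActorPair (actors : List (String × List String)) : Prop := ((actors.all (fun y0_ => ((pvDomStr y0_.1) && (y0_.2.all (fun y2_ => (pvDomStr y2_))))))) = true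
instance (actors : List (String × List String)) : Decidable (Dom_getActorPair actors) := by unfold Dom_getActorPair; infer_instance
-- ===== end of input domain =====

-- B replaces the per-pair set intersections with an inverted film→actor-indices index and per-actor
-- shared-film buckets (objective: alternative decomposition; not measured faster).

-- ===== PORT A =====
def getActorPair (actors : List (String × List String)) : List ((String × String) × List String) :=
  (PySem.List.enumerate (PySem.List.slice actors none (some (-1)))).foldl
    (fun result p =>
      (PySem.List.enumerate (PySem.List.slice actors (some (p.1 + 1)) none)).foldl
        (fun result q => result ++ [((p.2.1, q.2.1), PySem.Set.inter p.2.2 q.2.2)]) result)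
    []

-- ===== PORT B =====
def getActorPair_alt (actors : List (String × List String)) : List ((String × String) × List String) :=
  let n : Int := actors.length
  let pairs : List (String × Int) :=
    (PySem.List.enumerate actors).flatMap (fun p => p.2.2.map (fun f => (f, p.1)))
  let indexOf : PySem.Dict String (List Int) :=
    pairs.foldl (fun d q => PySem.Dict.modify d q.1 [] (fun l => l ++ [q.2])) PySem.Dict.empty
  (PySem.List.enumerate actors).foldl
    (fun result p =>
      let shared : PySem.Dict Int (List String) :=
        p.2.2.foldl (fun sh f =>
          (PySem.Dict.getD indexOf f []).foldl (fun sh j =>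
            if j > p.1 then PySem.Dict.modify sh j [] (fun l => l ++ [f]) else sh) sh) PySem.Dict.empty
      (PySem.List.pyRange (p.1 + 1) n 1).foldl
        (fun result j =>
          result ++ [((p.2.1, (PySem.List.pyGetD actors j ("", [])).1),
                      PySem.Set.ofList (PySem.Dict.getD shared j []))]) result)
    []

-- ===== PRECONDITION & SPEC =====
-- Pre_ states the set-representation invariant of the inputs: each actor's film list models a
-- Python set[str], so its elements are distinct. Every input of the Python type satisfies it.
def Pre_getActorPair (actors : List (String × List String)) : Prop :=
  ∀ a ∈ actors, a.2.Nodup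
instance (actors : List (String × List String)) : Decidable (Pre_getActorPair actors) := by
  unfold Pre_getActorPair; infer_instance
def pvWitness_getActorPair : (List (String × List String)) :=
  [("a", ["x", "y"]), ("b", ["y"]), ("c", [])]
def Spec_getActorPair (actors : List (String × List String)) (out : List ((String × String) × List String)) : Prop := out = getActorPair_alt actors
instance (actors : List (String × List String)) (out : List ((String × String) × List String)) : Decidable (Spec_getActorPair actors out) := by unfold Spec_getActorPair; infer_instance

-- ===== CLAIM (what is proved, stated in full; the proofs are below) =====
def Claim_equal_getActorPair : Prop := ∀ (actors : List (String × List String)), Dom_getActorPair actors → Pre_getActorPair actors → Spec_getActorPair actors (getActorPair actors)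

-- ===== LEMMAS AND PROOFS =====

def pvG (actors : List (String × List String)) (k : Nat) : String × List String :=
  actors.getD k ("", [])

def pvChunk (actors : List (String × List String)) (k : Nat) :
    List ((String × String) × List String) :=
  (List.range (actors.length - (k + 1))).map (fun r =>
    (((pvG actors k).1, (pvG actors (k + 1 + r)).1),
     PySem.Set.inter (pvG actors k).2 (pvG actors (k + 1 + r)).2))

lemma pvMapPairFilter (l : List String) (s : Int) (f : String) :
    ((l.map (fun g => (g, s))).filter (fun q => q.1 == f)).map (fun q => q.2)
      = List.replicate (l.count f) s := by
  induction l with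
  | nil => simp
  | cons g t ih =>
    by_cases h : g = f
    · subst h; simp [ih, List.replicate_succ]
    · simp [h, ih]

lemma pvPairsFilter (xs : List (String × List String)) (s : Int) (f : String) :
    (((PySem.List.enumerate xs s).flatMap (fun p => p.2.2.map (fun g => (g, p.1)))).filter
        (fun q => q.1 == f)).map (fun q => q.2)
      = (PySem.List.enumerate xs s).flatMap (fun p => List.replicate (p.2.2.count f) p.1) := by
  induction xs generalizing s with
  | nil => simp [PySem.List.enumerate_nil]
  | cons a t ih =>
    simp only [PySem.List.enumerate_cons, List.flatMap_cons, List.filter_append,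
      List.map_append, ih, pvMapPairFilter]

lemma pvIdxGe (xs : List (String × List String)) (s : Int) (f : String) :
    ∀ j ∈ (PySem.List.enumerate xs s).flatMap (fun p => List.replicate (p.2.2.count f) p.1),
      s ≤ j := by
  induction xs generalizing s with
  | nil => simp [PySem.List.enumerate_nil]
  | cons a t ih =>
    intro j hj
    simp only [PySem.List.enumerate_cons, List.flatMap_cons, List.mem_append] at hj
    rcases hj with hj | hj
    · rw [List.eq_of_mem_replicate hj]
    · have := ih (s + 1) j hj; omega

lemma pvIdxCount (xs : List (String × List String)) (s : Int) (f : String) (m : Nat)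
    (hm : m < xs.length) :
    ((PySem.List.enumerate xs s).flatMap (fun p => List.replicate (p.2.2.count f) p.1)).count
        (s + (m : Int))
      = (xs[m].2).count f := by
  induction xs generalizing s m with
  | nil => simp at hm
  | cons a t ih =>
    cases m with
    | zero =>
      have h0 : ((PySem.List.enumerate t (s + 1)).flatMap
          (fun p => List.replicate (p.2.2.count f) p.1)).count s = 0 := by
        apply List.count_eq_zero_of_not_mem
        intro hmem
        have := pvIdxGe t (s + 1) f _ hmem
        omega
      simp only [PySem.List.enumerate_cons, List.flatMap_cons, List.count_append,
        Nat.cast_zero, add_zero, h0, List.count_replicate]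
      simp
    | succ r =>
      have hr : r < t.length := by simpa using hm
      have h1 : (s + ((r + 1 : Nat) : Int)) = (s + 1) + (r : Int) := by push_cast; ring
      simp only [PySem.List.enumerate_cons, List.flatMap_cons, List.count_append]
      rw [h1, ih _ _ hr, List.count_replicate, if_neg (by simp; omega)]
      simp

lemma pvInnerFold (l : List Int) (sh : PySem.Dict Int (List String)) (f : String) (i j : Int) :
    ((l.foldl (fun sh j' => if j' > i then PySem.Dict.modify sh j' [] (fun t => t ++ [f]) else sh)
        sh).getD j [])
      = sh.getD j [] ++ (if j > i then List.replicate (l.count j) f else []) := by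
  induction l generalizing sh with
  | nil => simp
  | cons a t ih =>
    simp only [List.foldl_cons]
    by_cases ha : a > i
    · rw [if_pos ha, ih, PySem.Dict.getD_modify]
      by_cases hj : j = a
      · subst hj
        have hc : (j :: t).count j = t.count j + 1 := by simp
        simp [if_pos ha, hc, List.replicate_succ, List.append_assoc]
      · have hc : (a :: t).count j = t.count j := by simp [Ne.symm hj]
        simp [hj, hc]
    · rw [if_neg ha, ih]
      by_cases hji : j > i
      · have hja : a ≠ j := by omega
        have hc : (a :: t).count j = t.count j := by simp [hja]
        simp [hc]
      · simp [hji]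

lemma pvSharedFold (idxf : String → List Int) (fs : List String)
    (sh : PySem.Dict Int (List String)) (i j : Int) :
    ((fs.foldl (fun sh f =>
        (idxf f).foldl
          (fun sh j' => if j' > i then PySem.Dict.modify sh j' [] (fun t => t ++ [f]) else sh) sh)
        sh).getD j [])
      = sh.getD j []
        ++ fs.flatMap (fun f => if j > i then List.replicate ((idxf f).count j) f else []) := by
  induction fs generalizing sh with
  | nil => simp
  | cons f t ih =>
    simp only [List.foldl_cons, ih, pvInnerFold, List.flatMap_cons, List.append_assoc]

lemma pvFlatMapIf (l : List String) (p : String → Bool) :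
    l.flatMap (fun f => if p f then [f] else []) = l.filter p := by
  induction l with
  | nil => rfl
  | cons a t ih => by_cases h : p a <;> simp [h, ih]
lemma pvSharedSpec (actors : List (String × List String)) (hP : Pre_getActorPair actors)
    (k m : Nat) (hk : k < m) (hm : m < actors.length) :
    ((((pvG actors k).2).foldl (fun sh f =>
        ((((PySem.List.enumerate actors).flatMap (fun p => p.2.2.map (fun g => (g, p.1)))).foldl
            (fun d q => PySem.Dict.modify d q.1 [] (fun l => l ++ [q.2]))
            PySem.Dict.empty).getD f []).foldl
          (fun sh j => if j > ((k : Nat) : Int) then PySem.Dict.modify sh j [] (fun l => l ++ [f])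
            else sh) sh)
      PySem.Dict.empty).getD ((m : Nat) : Int) [])
    = PySem.Set.inter (pvG actors k).2 (pvG actors m).2 := by
  have hidx : ∀ f : String,
      (((PySem.List.enumerate actors).flatMap (fun p => p.2.2.map (fun g => (g, p.1)))).foldl
        (fun d q => PySem.Dict.modify d q.1 [] (fun l => l ++ [q.2])) PySem.Dict.empty).getD f []
      = (PySem.List.enumerate actors).flatMap (fun p => List.replicate (p.2.2.count f) p.1) := by
    intro f
    rw [PySem.Dict.getD_foldl_modify_append, pvPairsFilter]
    simp [PySem.Dict.getD, PySem.Dict.empty, PySem.Dict.get?]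
  rw [pvSharedFold (fun f =>
      (((PySem.List.enumerate actors).flatMap (fun p => p.2.2.map (fun g => (g, p.1)))).foldl
        (fun d q => PySem.Dict.modify d q.1 [] (fun l => l ++ [q.2]))
        PySem.Dict.empty).getD f [])]
  have hempty : (PySem.Dict.empty : PySem.Dict Int (List String)).getD ((m : Nat) : Int) [] = [] := by
    simp [PySem.Dict.getD, PySem.Dict.empty, PySem.Dict.get?]
  rw [hempty, List.nil_append]
  have hGm : pvG actors m = actors[m] := List.getD_eq_getElem _ _ hm
  have hnd : (actors[m].2).Nodup := hP actors[m] (List.getElem_mem hm)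
  rw [List.flatMap_congr (g := fun f => if (pvG actors m).2.contains f then [f] else [])
    (by
      intro f hf
      have hmk : ((m : Nat) : Int) > ((k : Nat) : Int) := by exact_mod_cast hk
      rw [if_pos hmk, hidx f]
      have hcast : ((m : Nat) : Int) = 0 + ((m : Nat) : Int) := by ring
      rw [hcast, pvIdxCount actors 0 f m hm]
      by_cases hfm : f ∈ actors[m].2
      · rw [List.count_eq_one_of_mem hnd hfm]
        simp [hGm, hfm]
      · rw [List.count_eq_zero_of_not_mem hfm]
        simp [hGm, hfm])]
  rw [pvFlatMapIf]
  rfl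
lemma pvA_closed (actors : List (String × List String)) :
    getActorPair actors = (List.range actors.length).flatMap (pvChunk actors) := by
  unfold getActorPair
  rw [PySem.List.slice_to_neg_one]
  simp only [PySem.List.foldl_append_singleton_eq_map, PySem.List.foldl_append_eq_flatMap,
    List.nil_append]
  rw [PySem.List.enumerate_eq_map_pyRange _ ("", []), List.flatMap_map,
    show PySem.List.len actors.dropLast = ((actors.length - 1 : Nat) : Int) from by
      simp [List.length_dropLast],
    PySem.List.pyRange_zero_natCast, List.flatMap_map]
  rcases hn : actors.length with _ | n'
  · have : actors = [] := List.length_eq_zero_iff.mp hn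
    subst this; simp
  · rw [List.range_succ, List.flatMap_append]
    have hlast : pvChunk actors n' = [] := by
      unfold pvChunk
      rw [show actors.length - (n' + 1) = 0 by omega]
      simp
    dsimp only
    simp only [List.flatMap_cons, List.flatMap_nil, List.append_nil, hlast,
      Nat.add_sub_cancel]
    apply List.flatMap_congr
    intro k hk
    have hk' : k < n' := List.mem_range.mp hk
    have hA : PySem.List.pyGetD actors.dropLast ((k : Nat) : Int) ("", []) = pvG actors k := by
      rw [PySem.List.pyGetD_natCast]
      unfold pvG
      rw [List.getD_eq_getElem _ _ (by simp [List.length_dropLast]; omega),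
        List.getD_eq_getElem _ _ (by omega), List.getElem_dropLast]
    have hslice : PySem.List.slice actors (some (((k : Nat) : Int) + 1)) = actors.drop (k + 1) := by
      rw [show (((k : Nat) : Int) + 1) = ((k + 1 : Nat) : Int) from by push_cast; ring,
        PySem.List.slice_from_natCast]
    rw [hA, hslice, PySem.List.enumerate_eq_map_pyRange _ ("", []),
      show PySem.List.len (actors.drop (k + 1)) = ((actors.length - (k + 1) : Nat) : Int) from by
        simp,
      PySem.List.pyRange_zero_natCast, List.map_map, List.map_map]
    unfold pvChunk
    rw [hn, show n' + 1 - (k + 1) = n' - k from by omega]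
    apply List.map_congr_left
    intro r hr
    have hr' : r < n' - k := List.mem_range.mp hr
    have hB : PySem.List.pyGetD (actors.drop (k + 1)) ((r : Nat) : Int) ("", [])
        = pvG actors (k + 1 + r) := by
      rw [PySem.List.pyGetD_natCast]
      unfold pvG
      rw [List.getD_eq_getElem _ _ (by simp; omega),
        List.getD_eq_getElem _ _ (by omega), List.getElem_drop]
    simp only [Function.comp, hB]
lemma pvB_closed (actors : List (String × List String)) (hP : Pre_getActorPair actors) :
    getActorPair_alt actors = (List.range actors.length).flatMap (pvChunk actors) := by
  unfold getActorPair_alt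
  simp only [PySem.List.foldl_append_singleton_eq_map, PySem.List.foldl_append_eq_flatMap,
    List.nil_append]
  rw [PySem.List.enumerate_eq_map_pyRange _ ("", []), List.flatMap_map,
    show PySem.List.len actors = ((actors.length : Nat) : Int) from by simp,
    PySem.List.pyRange_zero_natCast, List.flatMap_map]
  dsimp only
  have hEnum : List.map (fun j => (j, PySem.List.pyGetD actors j ("", [])))
      (List.map (fun k => ((k : Nat) : Int)) (List.range actors.length))
      = PySem.List.enumerate actors := by
    rw [← PySem.List.pyRange_zero_natCast,
      ← show PySem.List.len actors = ((actors.length : Nat) : Int) from by simp,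
      ← PySem.List.enumerate_eq_map_pyRange _ ("", [])]
  rw [hEnum]
  apply List.flatMap_congr
  intro k hk
  have hk' : k < actors.length := List.mem_range.mp hk
  have hGk : PySem.List.pyGetD actors ((k : Nat) : Int) ("", []) = pvG actors k := by
    rw [PySem.List.pyGetD_natCast]; rfl
  rw [hGk, PySem.List.pyRange_one,
    show (((actors.length : Nat) : Int) - (((k : Nat) : Int) + 1)).toNat
        = actors.length - (k + 1) from by omega,
    List.map_map]
  unfold pvChunk
  apply List.map_congr_left
  intro r hr
  have hr' : r < actors.length - (k + 1) := List.mem_range.mp hr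
  dsimp only [Function.comp]
  have hcast : (((k : Nat) : Int) + 1 + ((r : Nat) : Int)) = ((k + 1 + r : Nat) : Int) := by
    push_cast; ring
  have hGm : PySem.List.pyGetD actors (((k : Nat) : Int) + 1 + ((r : Nat) : Int)) ("", [])
      = pvG actors (k + 1 + r) := by
    rw [hcast, PySem.List.pyGetD_natCast]; rfl
  rw [hGm, hcast, pvSharedSpec actors hP k (k + 1 + r) (by omega) (by omega)]
  have hndk : (pvG actors k).2.Nodup := by
    unfold pvG
    rw [List.getD_eq_getElem _ _ hk']
    exact hP _ (List.getElem_mem _)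
  have hnd : (PySem.Set.inter (pvG actors k).2 (pvG actors (k + 1 + r)).2).Nodup := by
    simpa [PySem.Set.inter] using hndk.filter _
  rw [PySem.Set.ofList_eq_self_of_nodup _ hnd]

-- ===== VERDICT (by name: the statement is the Claim_ definition above) =====
theorem getActorPair_spec : Claim_equal_getActorPair := by
  intro actors _hD hP
  unfold Spec_getActorPair
  rw [pvA_closed, pvB_closed actors hP]
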